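-- pv_equiv track=rewrite | github.com/venkatesh21bit/Protothon-26 | apps/api/app/services/ai_agents/followup_agent.py | _generate_care_instructions
-- ===== SOURCE A (Python) =====
-- from typing import Dict, List, Optional
--
-- def _generate_care_instructions(conditions: List[Dict] = None,
--                                 urgency: str = 'medium') -> List[Dict]:
--     """Generate AI care instructions"""
--     instructions = []
--
--     # General instructions
--     instructions.append({
--         "category": "general",
--         "instruction": "Take all prescribed medications as directed",
--         "priority": "high"
--     })
--
--     instructions.append({
--         "category": "general",
--         "instruction": "Stay hydrated - drink at least 8 glasses of water daily",
--         "priority": "normal"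
--     })
--
--     instructions.append({
--         "category": "general",
--         "instruction": "Get adequate rest and sleep",
--         "priority": "normal"
--     })
--
--     # Urgency-based instructions
--     if urgency in ['high', 'critical']:
--         instructions.append({
--             "category": "monitoring",
--             "instruction": "Monitor temperature every 4 hours",
--             "priority": "high"
--         })
--         instructions.append({
--             "category": "emergency",
--             "instruction": "Seek immediate care if symptoms worsen",
--             "priority": "critical"
--         })
--
--     # Condition-specific instructions
--     if conditions:
--         for condition in conditions[:2]:  # Top 2 conditions
--             cond_name = condition.get('name', '').lower()
--
--             if 'fever' in cond_name or 'viral' in cond_name: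
--                 instructions.append({
--                     "category": "condition_specific",
--                     "instruction": "Use fever-reducing medication if temperature exceeds 101°F",
--                     "priority": "high"
--                 })
--             elif 'respiratory' in cond_name or 'cough' in cond_name:
--                 instructions.append({
--                     "category": "condition_specific",
--                     "instruction": "Practice deep breathing exercises 3 times daily",
--                     "priority": "normal"
--                 })
--             elif 'gastro' in cond_name or 'stomach' in cond_name:
--                 instructions.append({
--                     "category": "condition_specific",
--                     "instruction": "Follow BRAT diet (Bananas, Rice, Applesauce, Toast)",
--                     "priority": "high"
--                 })
--
--     return instructions
-- ===== SOURCE B (Python) =====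
-- # Builds the result as one concatenation of three independent segments; the
-- # condition segment is computed recursively, and the rule is chosen by indexing
-- # a parallel instruction array at min(all matching rule indices) instead of an
-- # if/elif first-match chain (min of ascending indices = first match).
-- _BASE = [
--     {"category": "general",
--      "instruction": "Take all prescribed medications as directed",
--      "priority": "high"},
--     {"category": "general",
--      "instruction": "Stay hydrated - drink at least 8 glasses of water daily",
--      "priority": "normal"},
--     {"category": "general",
--      "instruction": "Get adequate rest and sleep",
--      "priority": "normal"},
-- ]
--
-- _URGENT = [
--     {"category": "monitoring",
--      "instruction": "Monitor temperature every 4 hours",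
--      "priority": "high"},
--     {"category": "emergency",
--      "instruction": "Seek immediate care if symptoms worsen",
--      "priority": "critical"},
-- ]
--
-- _KEYWORDS = [("fever", "viral"), ("respiratory", "cough"), ("gastro", "stomach")]
--
-- _COND_INSTR = [
--     {"category": "condition_specific",
--      "instruction": "Use fever-reducing medication if temperature exceeds 101\u00b0F",
--      "priority": "high"},
--     {"category": "condition_specific",
--      "instruction": "Practice deep breathing exercises 3 times daily",
--      "priority": "normal"},
--     {"category": "condition_specific",
--      "instruction": "Follow BRAT diet (Bananas, Rice, Applesauce, Toast)",
--      "priority": "high"},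
-- ]
--
--
-- def _cond_part(conds):
--     if not conds:
--         return []
--     name = conds[0].get('name', '').lower()
--     hits = [i for i, kws in enumerate(_KEYWORDS) if any(k in name for k in kws)]
--     head = [dict(_COND_INSTR[min(hits)])] if hits else []
--     return head + _cond_part(conds[1:])
--
--
-- def _generate_care_instructions(conditions=None, urgency='medium'):
--     return ([dict(d) for d in _BASE]
--             + ([dict(d) for d in _URGENT] if urgency in ('high', 'critical') else [])
--             + _cond_part((conditions or [])[:2]))
-- ===== Notes on version B (the rewrite author's own statement) =====
-- stated objective: alternative
-- what changed: The imperative append loop with an if/elif first-match chain is replaced by a pure concatenation of three independently built segments, the condition segment computed recursively with the rule chosen by indexing a parallel instruction array at min(all matching keyword-group indices) rather than by sequential elif scanning.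
import Mathlib
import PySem

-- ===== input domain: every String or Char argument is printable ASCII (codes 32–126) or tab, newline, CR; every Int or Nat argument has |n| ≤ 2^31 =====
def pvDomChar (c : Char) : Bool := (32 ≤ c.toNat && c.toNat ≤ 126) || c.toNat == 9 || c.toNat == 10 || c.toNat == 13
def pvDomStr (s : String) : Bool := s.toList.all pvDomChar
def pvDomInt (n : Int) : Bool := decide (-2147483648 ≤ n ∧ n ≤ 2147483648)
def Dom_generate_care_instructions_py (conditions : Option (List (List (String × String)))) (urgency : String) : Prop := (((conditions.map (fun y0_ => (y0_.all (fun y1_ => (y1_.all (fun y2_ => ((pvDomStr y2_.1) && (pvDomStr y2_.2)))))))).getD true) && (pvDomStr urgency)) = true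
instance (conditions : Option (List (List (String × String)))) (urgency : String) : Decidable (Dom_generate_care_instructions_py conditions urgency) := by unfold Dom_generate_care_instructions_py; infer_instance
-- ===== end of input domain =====

-- B builds the result as one concatenation of three independent segments; the condition
-- segment is recursive and picks its rule by indexing a parallel array at the minimum
-- matching keyword-group index (objective: alternative; same cost).

-- ===== PORT A =====
-- the instruction dicts, as association lists in Python insertion order
def pvGen1 : List (String × String) :=
  [("category", "general"), ("instruction", "Take all prescribed medications as directed"), ("priority", "high")]
def pvGen2 : List (String × String) :=
  [("category", "general"), ("instruction", "Stay hydrated - drink at least 8 glasses of water daily"), ("priority", "normal")]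
def pvGen3 : List (String × String) :=
  [("category", "general"), ("instruction", "Get adequate rest and sleep"), ("priority", "normal")]
def pvMon : List (String × String) :=
  [("category", "monitoring"), ("instruction", "Monitor temperature every 4 hours"), ("priority", "high")]
def pvEmerg : List (String × String) :=
  [("category", "emergency"), ("instruction", "Seek immediate care if symptoms worsen"), ("priority", "critical")]
def pvFever : List (String × String) :=
  [("category", "condition_specific"), ("instruction", "Use fever-reducing medication if temperature exceeds 101°F"), ("priority", "high")]
def pvResp : List (String × String) :=
  [("category", "condition_specific"), ("instruction", "Practice deep breathing exercises 3 times daily"), ("priority", "normal")]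
def pvGastro : List (String × String) :=
  [("category", "condition_specific"), ("instruction", "Follow BRAT diet (Bananas, Rice, Applesauce, Toast)"), ("priority", "high")]

def generate_care_instructions_py (conditions : Option (List (List (String × String)))) (urgency : String) : List (List (String × String)) :=
  let instructions : List (List (String × String)) := []
  let instructions := instructions ++ [pvGen1]
  let instructions := instructions ++ [pvGen2]
  let instructions := instructions ++ [pvGen3]
  let instructions :=
    if urgency = "high" ∨ urgency = "critical" then
      (instructions ++ [pvMon]) ++ [pvEmerg]
    else instructions
  -- `if conditions:` — truthy iff conditions is a non-empty list
  match conditions with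
  | none => instructions
  | some cs =>
    if cs = [] then instructions
    else
      -- for condition in conditions[:2]
      (cs.take 2).foldl (fun acc condition =>
        let cond_name := PySem.Str.lower (PySem.Dict.getD (PySem.Dict.mk condition) "name" "")
        if PySem.Str.isIn "fever" cond_name || PySem.Str.isIn "viral" cond_name then
          acc ++ [pvFever]
        else if PySem.Str.isIn "respiratory" cond_name || PySem.Str.isIn "cough" cond_name then
          acc ++ [pvResp]
        else if PySem.Str.isIn "gastro" cond_name || PySem.Str.isIn "stomach" cond_name then
          acc ++ [pvGastro]
        else acc) instructions

-- ===== PORT B =====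
def pvBase : List (List (String × String)) := [pvGen1, pvGen2, pvGen3]
def pvUrgent : List (List (String × String)) := [pvMon, pvEmerg]
def pvKeywords : List (List String) := [["fever", "viral"], ["respiratory", "cough"], ["gastro", "stomach"]]
def pvCondInstr : List (List (String × String)) := [pvFever, pvResp, pvGastro]

-- _cond_part: recursion on the condition list; min over all matching keyword-group indices
def pvCondPart : List (List (String × String)) → List (List (String × String))
  | [] => []
  | c :: t =>
    let name := PySem.Str.lower (PySem.Dict.getD (PySem.Dict.mk c) "name" "")
    let hits := ((PySem.List.enumerate pvKeywords).filter
        (fun p => p.2.any (fun k => PySem.Str.isIn k name))).map (·.1)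
    let head :=
      if hits ≠ [] then
        match PySem.List.min? hits (fun x => x) with
        | some i => (PySem.List.pyGet? pvCondInstr i).toList
        | none => []
      else []
    head ++ pvCondPart t

def generate_care_instructions_py_alt (conditions : Option (List (List (String × String)))) (urgency : String) : List (List (String × String)) :=
  pvBase
    ++ (if urgency = "high" ∨ urgency = "critical" then pvUrgent else [])
    ++ pvCondPart (((conditions.getD [])).take 2)

-- ===== PRECONDITION & SPEC =====
def Spec_generate_care_instructions_py (conditions : Option (List (List (String × String)))) (urgency : String) (out : List (List (String × String))) : Prop := out = generate_care_instructions_py_alt conditions urgency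
instance (conditions : Option (List (List (String × String)))) (urgency : String) (out : List (List (String × String))) : Decidable (Spec_generate_care_instructions_py conditions urgency out) := by unfold Spec_generate_care_instructions_py; infer_instance

-- ===== CLAIM (what is proved, stated in full; the proofs are below) =====
def Claim_equal_generate_care_instructions_py : Prop := ∀ (conditions : Option (List (List (String × String)))) (urgency : String), Dom_generate_care_instructions_py conditions urgency → Spec_generate_care_instructions_py conditions urgency (generate_care_instructions_py conditions urgency)

-- ===== LEMMAS AND PROOFS =====

-- per condition: A's first-match elif chain equals B's min-index selection
lemma pv_step_eq (n : String) :
    (if PySem.Str.isIn "fever" n || PySem.Str.isIn "viral" n then [pvFever]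
     else if PySem.Str.isIn "respiratory" n || PySem.Str.isIn "cough" n then [pvResp]
     else if PySem.Str.isIn "gastro" n || PySem.Str.isIn "stomach" n then [pvGastro]
     else ([] : List (List (String × String)))) =
    (let hits := ((PySem.List.enumerate pvKeywords).filter
        (fun p => p.2.any (fun k => PySem.Str.isIn k n))).map (·.1)
     if hits ≠ [] then
        match PySem.List.min? hits (fun x => x) with
        | some i => (PySem.List.pyGet? pvCondInstr i).toList
        | none => []
     else []) := by
  simp only [pvKeywords, PySem.List.enumerate_cons, PySem.List.enumerate_nil,
    List.filter, List.any_cons, List.any_nil, Bool.or_false]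
  cases hf : (PySem.Str.isIn "fever" n || PySem.Str.isIn "viral" n) <;>
  cases hr : (PySem.Str.isIn "respiratory" n || PySem.Str.isIn "cough" n) <;>
  cases hg : (PySem.Str.isIn "gastro" n || PySem.Str.isIn "stomach" n) <;>
    simp_all <;> decide

-- A's accumulating loop equals B's recursion appended after the prefix
lemma pv_fold_eq (cs : List (List (String × String)))
    (pre : List (List (String × String))) :
    cs.foldl (fun acc condition =>
        let cond_name := PySem.Str.lower (PySem.Dict.getD (PySem.Dict.mk condition) "name" "")
        if PySem.Str.isIn "fever" cond_name || PySem.Str.isIn "viral" cond_name then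
          acc ++ [pvFever]
        else if PySem.Str.isIn "respiratory" cond_name || PySem.Str.isIn "cough" cond_name then
          acc ++ [pvResp]
        else if PySem.Str.isIn "gastro" cond_name || PySem.Str.isIn "stomach" cond_name then
          acc ++ [pvGastro]
        else acc) pre =
    pre ++ pvCondPart cs := by
  induction cs generalizing pre with
  | nil => simp [pvCondPart]
  | cons c t ih =>
    simp only [List.foldl_cons, pvCondPart]
    rw [ih]
    have key :
        (if PySem.Str.isIn "fever" (PySem.Str.lower (PySem.Dict.getD (PySem.Dict.mk c) "name" "")) ||
              PySem.Str.isIn "viral" (PySem.Str.lower (PySem.Dict.getD (PySem.Dict.mk c) "name" "")) then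
            pre ++ [pvFever]
          else if PySem.Str.isIn "respiratory" (PySem.Str.lower (PySem.Dict.getD (PySem.Dict.mk c) "name" "")) ||
              PySem.Str.isIn "cough" (PySem.Str.lower (PySem.Dict.getD (PySem.Dict.mk c) "name" "")) then
            pre ++ [pvResp]
          else if PySem.Str.isIn "gastro" (PySem.Str.lower (PySem.Dict.getD (PySem.Dict.mk c) "name" "")) ||
              PySem.Str.isIn "stomach" (PySem.Str.lower (PySem.Dict.getD (PySem.Dict.mk c) "name" "")) then
            pre ++ [pvGastro]
          else pre) =
        pre ++ (let name := PySem.Str.lower (PySem.Dict.getD (PySem.Dict.mk c) "name" "")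
          let hits := ((PySem.List.enumerate pvKeywords).filter
              (fun p => p.2.any (fun k => PySem.Str.isIn k name))).map (·.1)
          if hits ≠ [] then
            match PySem.List.min? hits (fun x => x) with
            | some i => (PySem.List.pyGet? pvCondInstr i).toList
            | none => []
          else []) := by
      rw [← pv_step_eq]
      split_ifs <;> simp
    rw [key, List.append_assoc]

theorem pv_main (conditions : Option (List (List (String × String)))) (urgency : String) :
    generate_care_instructions_py conditions urgency = generate_care_instructions_py_alt conditions urgency := by
  unfold generate_care_instructions_py generate_care_instructions_py_alt
  match conditions with
  | none =>
    dsimp only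
    simp only [Option.getD_none, List.take_nil]
    split_ifs <;> simp [pvBase, pvUrgent, pvCondPart]
  | some cs =>
    dsimp only
    simp only [Option.getD_some]
    match cs with
    | [] =>
      rw [if_pos rfl]
      simp only [List.take_nil]
      split_ifs <;> simp [pvBase, pvUrgent, pvCondPart]
    | c :: t =>
      rw [if_neg (by simp), pv_fold_eq]
      split_ifs <;> simp [pvBase, pvUrgent]

-- ===== VERDICT (by name: the statement is the Claim_ definition above) =====
theorem generate_care_instructions_py_spec : Claim_equal_generate_care_instructions_py := by
  intro conditions urgency _
  exact pv_main conditions urgency
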